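-- pv_equiv track=rewrite | github.com/guibgoulart/t1-seg | kasiski.py | get_repeating_words
-- ===== SOURCE A (Python) =====
-- def get_repeating_words(texto_cifrado):
--     words_seen = set()
--     repeating_words = set()
--
--     for i in range(len(texto_cifrado) - 2):  # A palavra deve ter no mínimo 3 letras
--         current_word = texto_cifrado[i:i + 3]
--         if current_word in words_seen:
--             repeating_words.add(current_word)
--         else:
--             words_seen.add(current_word)
--
--     return repeating_words
-- ===== SOURCE B (Python) =====
-- def get_repeating_words(texto_cifrado):
--     windows = [texto_cifrado[i:i + 3] for i in range(len(texto_cifrado) - 2)]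
--     first = {}
--     for i, w in enumerate(windows):
--         first.setdefault(w, i)
--     return {w for i, w in enumerate(windows) if first.get(w) != i}
-- ===== Notes on version B (the rewrite author's own statement) =====
-- stated objective: alternative
-- what changed: B is staged tabulate-then-filter: one pass builds a table mapping each 3-char window to its first-occurrence index, then a separate filter pass collects every window standing at a position other than its first occurrence, replacing A's online duplicate detection with two incrementally maintained sets and a per-iteration if/else branch.
import Mathlib
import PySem

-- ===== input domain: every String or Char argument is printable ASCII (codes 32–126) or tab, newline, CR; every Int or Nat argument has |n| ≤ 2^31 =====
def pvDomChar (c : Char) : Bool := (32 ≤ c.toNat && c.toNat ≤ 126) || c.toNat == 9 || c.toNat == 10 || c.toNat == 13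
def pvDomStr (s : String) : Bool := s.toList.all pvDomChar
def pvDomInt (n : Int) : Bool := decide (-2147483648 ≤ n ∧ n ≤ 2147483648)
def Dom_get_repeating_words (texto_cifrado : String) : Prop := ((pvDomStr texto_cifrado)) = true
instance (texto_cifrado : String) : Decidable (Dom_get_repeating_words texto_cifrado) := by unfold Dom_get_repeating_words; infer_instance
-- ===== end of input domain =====

-- B replaces A's online duplicate detection (two incrementally maintained sets with a branch)
-- by a staged tabulate-then-filter: first build a table of each window's first-occurrence index,
-- then filter the windows standing at a position other than their first occurrence (objective: alternative).

-- ===== PORT A =====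
def get_repeating_words (texto_cifrado : String) : List String :=
  ((PySem.List.pyRange 0 (PySem.Str.len texto_cifrado - 2) 1).foldl
    (fun (st : PySem.Set String × PySem.Set String) i =>
      let current_word := PySem.Str.slice texto_cifrado (some i) (some (i + 3))
      if PySem.Set.contains st.1 current_word then (st.1, PySem.Set.add st.2 current_word)
      else (PySem.Set.add st.1 current_word, st.2))
    (PySem.Set.empty, PySem.Set.empty)).2

-- ===== PORT B =====
def get_repeating_words_alt (texto_cifrado : String) : List String :=
  let windows := (PySem.List.pyRange 0 (PySem.Str.len texto_cifrado - 2) 1).map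
    (fun i => PySem.Str.slice texto_cifrado (some i) (some (i + 3)))
  let first := (PySem.List.enumerate windows 0).foldl
    (fun (d : PySem.Dict String Int) p => PySem.Dict.setdefault d p.2 p.1) PySem.Dict.empty
  (PySem.List.enumerate windows 0).foldl
    (fun (acc : PySem.Set String) p =>
      if PySem.Dict.get? first p.2 != some p.1 then PySem.Set.add acc p.2 else acc)
    PySem.Set.empty

-- ===== PRECONDITION & SPEC =====
def Spec_get_repeating_words (texto_cifrado : String) (out : List String) : Prop := out = get_repeating_words_alt texto_cifrado
instance (texto_cifrado : String) (out : List String) : Decidable (Spec_get_repeating_words texto_cifrado out) := by unfold Spec_get_repeating_words; infer_instance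

-- ===== CLAIM (what is proved, stated in full; the proofs are below) =====
def Claim_equal_get_repeating_words : Prop := ∀ (texto_cifrado : String), Dom_get_repeating_words texto_cifrado → Spec_get_repeating_words texto_cifrado (get_repeating_words texto_cifrado)

-- ===== LEMMAS AND PROOFS =====

lemma grw_ofList_append_singleton (pref : List String) (w : String) :
    PySem.Set.ofList (pref ++ [w]) = PySem.Set.add (PySem.Set.ofList pref) w := by
  rw [PySem.Set.ofList_eq_foldl, PySem.Set.ofList_eq_foldl, List.foldl_append,
      List.foldl_cons, List.foldl_nil]

lemma grw_contains_ofList (pref : List String) (w : String) :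
    PySem.Set.contains (PySem.Set.ofList pref) w = pref.contains w := by
  simp [PySem.Set.contains, PySem.Set.mem_ofList]

-- The first-occurrence table: looking up w in the dict built by setdefault over enumerate
-- gives w's entry in d if present, else n + (index of w's first occurrence in ws).
lemma grw_first_get (w : String) (ws : List String) :
    ∀ (n : Int) (d : PySem.Dict String Int),
    PySem.Dict.get? ((PySem.List.enumerate ws n).foldl
        (fun (d : PySem.Dict String Int) p => PySem.Dict.setdefault d p.2 p.1) d) w
    = match PySem.Dict.get? d w with
      | some v => some v
      | none => (PySem.List.index? ws w).map (fun k => n + (k : Int)) := by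
  induction ws with
  | nil =>
    intro n d
    rw [PySem.List.enumerate_nil, List.foldl_nil]
    cases h : PySem.Dict.get? d w with
    | none => simp [PySem.List.index?_eq_idxOf?, List.idxOf?]
    | some v => rfl
  | cons x ws ih =>
    intro n d
    simp only [PySem.List.enumerate_cons, List.foldl_cons]
    rw [ih]
    by_cases hwx : w = x
    · subst hwx
      rw [PySem.Dict.get?_setdefault_self]
      cases h : PySem.Dict.get? d w with
      | none => rw [PySem.List.index?_cons_self]; simp
      | some v => simp
    · rw [PySem.Dict.get?_setdefault_of_ne d n hwx,
          PySem.List.index?_cons_of_ne ws (Ne.symm hwx)]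
      cases h : PySem.Dict.get? d w with
      | none =>
        cases hi : PySem.List.index? ws w with
        | none => simp
        | some k => simp; ring
      | some v => simp

-- B's filter condition at position pref.length with current word w equals "w occurred earlier".
lemma grw_cond (pref rest : List String) (w : String) :
    ((PySem.List.index? (pref ++ w :: rest) w).map (fun k => ((k : Int))) != some (pref.length : Int))
      = pref.contains w := by
  by_cases hc : w ∈ pref
  · have h1 : PySem.List.index? (pref ++ w :: rest) w = PySem.List.index? pref w :=
      PySem.List.index?_append_of_mem _ hc
    obtain ⟨k, hk⟩ := Option.isSome_iff_exists.mp ((PySem.List.index?_isSome_iff pref w).mpr hc)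
    obtain ⟨hklt, -, -⟩ := PySem.List.getElem_of_index?_eq_some hk
    rw [h1, hk]
    have hne : ((k : Int)) ≠ (pref.length : Int) := by exact_mod_cast Nat.ne_of_lt hklt
    simp [hne, hc]
  · have h1 : PySem.List.index? (pref ++ w :: rest) w = some pref.length :=
      (PySem.List.index?_eq_some_iff _ _ _).mpr ⟨pref, rest, rfl, rfl, hc⟩
    rw [h1]
    simp [hc]

-- Loop correspondence: A's seen/repeating fold over the remaining windows, with seen = the set of
-- the already-processed prefix, equals B's filter fold over the remaining enumerated windows.
lemma grw_loop_eq (ws : List String) :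
    ∀ (rest pref : List String) (rep : PySem.Set String), pref ++ rest = ws →
    (rest.foldl
      (fun (st : PySem.Set String × PySem.Set String) w =>
        if PySem.Set.contains st.1 w then (st.1, PySem.Set.add st.2 w)
        else (PySem.Set.add st.1 w, st.2))
      (PySem.Set.ofList pref, rep)).2
    = (PySem.List.enumerate rest (pref.length : Int)).foldl
        (fun (acc : PySem.Set String) p =>
          if ((PySem.List.index? ws p.2).map (fun k => ((k : Int))) != some p.1)
            then PySem.Set.add acc p.2 else acc)
        rep := by
  intro rest
  induction rest with
  | nil => intro pref rep _; rw [List.foldl_nil, PySem.List.enumerate_nil, List.foldl_nil]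
  | cons w rest ih =>
    intro pref rep h
    subst h
    simp only [PySem.List.enumerate_cons, List.foldl_cons]
    rw [grw_contains_ofList pref w, grw_cond pref rest w]
    have hlen : (pref.length : Int) + 1 = ((pref ++ [w]).length : Int) := by simp
    by_cases hc : pref.contains w
    · have hset : PySem.Set.ofList (pref ++ [w]) = PySem.Set.ofList pref := by
        rw [grw_ofList_append_singleton]
        simp [PySem.Set.add]
        simpa using hc
      rw [hc, if_pos rfl, if_pos rfl, hlen, ← hset]
      exact ih (pref ++ [w]) (PySem.Set.add rep w) (by simp)
    · have hcf : pref.contains w = false := by simpa using hc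
      rw [hcf, if_neg (by simp), if_neg (by simp), hlen, ← grw_ofList_append_singleton]
      exact ih (pref ++ [w]) rep (by simp)

-- End-to-end on an arbitrary window list: A's two-set fold equals B's table-then-filter folds.
lemma grw_main (ws : List String) :
    (ws.foldl
      (fun (st : PySem.Set String × PySem.Set String) w =>
        if PySem.Set.contains st.1 w then (st.1, PySem.Set.add st.2 w)
        else (PySem.Set.add st.1 w, st.2))
      (PySem.Set.empty, PySem.Set.empty)).2
    = (PySem.List.enumerate ws 0).foldl
        (fun (acc : PySem.Set String) p =>
          if PySem.Dict.get? ((PySem.List.enumerate ws 0).foldl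
              (fun (d : PySem.Dict String Int) p => PySem.Dict.setdefault d p.2 p.1)
              PySem.Dict.empty) p.2 != some p.1
            then PySem.Set.add acc p.2 else acc)
        PySem.Set.empty := by
  have hfirst : ∀ w, PySem.Dict.get? ((PySem.List.enumerate ws 0).foldl
      (fun (d : PySem.Dict String Int) p => PySem.Dict.setdefault d p.2 p.1)
      PySem.Dict.empty) w = (PySem.List.index? ws w).map (fun k => ((k : Int))) := by
    intro w
    rw [grw_first_get w ws 0 PySem.Dict.empty]
    simp [PySem.Dict.get?_empty]
  rw [PySem.List.foldl_congr_mem (PySem.List.enumerate ws 0) _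
      (fun (acc : PySem.Set String) p =>
        if ((PySem.List.index? ws p.2).map (fun k => ((k : Int))) != some p.1)
          then PySem.Set.add acc p.2 else acc)
      PySem.Set.empty (fun acc p _ => by rw [hfirst p.2])]
  have h1 := grw_loop_eq ws ws [] PySem.Set.empty rfl
  simpa using h1

-- ===== VERDICT (by name: the statement is the Claim_ definition above) =====
theorem get_repeating_words_spec : Claim_equal_get_repeating_words := by
  unfold Claim_equal_get_repeating_words
  intro t _
  unfold Spec_get_repeating_words get_repeating_words get_repeating_words_alt
  have h := grw_main ((PySem.List.pyRange 0 (PySem.Str.len t - 2) 1).map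
    (fun i => PySem.Str.slice t (some i) (some (i + 3))))
  rw [List.foldl_map] at h
  simpa using h
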